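-- pv_equiv track=rewrite | github.com/Huzaifa-Shahid-6ll/Digital_product-auto_poster | src/ai/listing_generator.py | _ensure_tags
-- ===== SOURCE A (Python) =====
-- def _ensure_tags(tags: list) -> list[str]:
--     """Ensure exactly 13 tags."""
--     # Convert to strings
--     tag_strings = [str(t).strip() for t in tags if str(t).strip()]
--
--     # Remove duplicates while preserving order
--     seen = set()
--     unique_tags = []
--     for tag in tag_strings:
--         if tag.lower() not in seen:
--             seen.add(tag.lower())
--             unique_tags.append(tag)
--
--     # Pad with empty or truncate
--     if len(unique_tags) < 13:
--         # Add generic tags if needed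
--         generic = ["digital download", "printable", "digital planner", "download"]
--         for g in generic:
--             if len(unique_tags) >= 13:
--                 break
--             if g.lower() not in seen:
--                 unique_tags.append(g)
--                 seen.add(g.lower())
--
--     return unique_tags[:13]
-- ===== SOURCE B (Python) =====
-- def _ensure_tags(tags: list) -> list[str]:
--     """Ensure exactly 13 tags."""
--     cleaned = [str(t).strip() for t in tags if str(t).strip()]
--     cleaned += ["digital download", "printable", "digital planner", "download"]
--     rest = [(t, t.lower()) for t in cleaned]
--     out = []
--     while rest and len(out) < 13:
--         head, key = rest[0]
--         out.append(head)
--         if len(out) == 13: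
--             break
--         rest = [p for p in rest[1:] if p[1] != key]
--     return out
-- ===== Notes on version B (the rewrite author's own statement) =====
-- stated objective: alternative
-- what changed: Replaces A's seen-set dedup pass plus a separate break-guarded generic-padding phase by a set-free selection loop over (tag, lowercased-key) pairs: repeatedly take the first remaining candidate (cleaned tags then generics) and filter its case-insensitive duplicates out of the remainder, stopping as soon as 13 tags are collected.
import Mathlib
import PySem

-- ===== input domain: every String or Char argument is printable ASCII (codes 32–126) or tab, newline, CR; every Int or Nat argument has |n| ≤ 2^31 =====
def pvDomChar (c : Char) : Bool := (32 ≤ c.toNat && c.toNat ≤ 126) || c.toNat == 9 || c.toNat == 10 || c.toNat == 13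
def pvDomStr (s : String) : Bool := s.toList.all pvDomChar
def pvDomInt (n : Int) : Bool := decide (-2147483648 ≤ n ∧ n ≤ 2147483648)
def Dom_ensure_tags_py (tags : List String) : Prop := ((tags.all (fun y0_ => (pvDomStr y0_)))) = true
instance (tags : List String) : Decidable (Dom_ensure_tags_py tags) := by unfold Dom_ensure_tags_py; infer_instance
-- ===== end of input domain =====

-- B replaces A's seen-set dedup + separate padding phase by a set-free selection loop:
-- take the first remaining candidate, filter its case-insensitive duplicates out of the
-- rest, stop at 13 (objective: alternative decomposition, same asymptotic cost).

-- ===== PORT A =====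
-- A's dedup step: 'if tag.lower() not in seen: seen.add(tag.lower()); unique_tags.append(tag)'
def pvDedupStep (st : PySem.Set String × List String) (t : String) :
    PySem.Set String × List String :=
  if PySem.Set.contains st.1 (PySem.Str.lower t) then st
  else (PySem.Set.add st.1 (PySem.Str.lower t), st.2 ++ [t])

-- A's padding loop: 'for g in generic: if len(unique) >= 13: break; if g.lower() not in seen: unique.append(g); seen.add(g.lower())'
def pvPadLoop : List String → PySem.Set String → List String → List String
  | [], _, u => u
  | g :: gs, s, u =>
    if 13 ≤ u.length then u
    else if PySem.Set.contains s (PySem.Str.lower g) then pvPadLoop gs s u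
    else pvPadLoop gs (PySem.Set.add s (PySem.Str.lower g)) (u ++ [g])

def ensure_tags_py (tags : List String) : List String :=
  -- tag_strings = [str(t).strip() for t in tags if str(t).strip()]
  let tag_strings :=
    (tags.filter (fun t => !(PySem.Str.strip t == ""))).map (fun t => PySem.Str.strip t)
  -- dedup loop building (seen, unique_tags)
  let p := tag_strings.foldl pvDedupStep (PySem.Set.empty, [])
  -- if len(unique_tags) < 13: pad with generics (break-guarded loop)
  let unique :=
    if p.2.length < 13 then
      pvPadLoop ["digital download", "printable", "digital planner", "download"] p.1 p.2
    else p.2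
  unique.take 13

-- ===== PORT B =====
-- B's while loop over (tag, lowercase-key) pairs:
-- 'while rest and len(out) < 13: head, key = rest[0]; out.append(head); if len(out) == 13: break; rest = [p for p in rest[1:] if p[1] != key]'
def pvBLoop : List (String × String) → List String → List String
  | [], out => out
  | (h, k) :: t, out =>
    if 13 ≤ out.length then out
    else if out.length + 1 = 13 then out ++ [h]
    else pvBLoop (t.filter (fun p => !(p.2 == k))) (out ++ [h])
  termination_by rest _ => rest.length
  decreasing_by
    simp only [List.length_unattach]
    exact Nat.lt_succ_of_le (le_trans (List.length_filter_le _ _) (by simp))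

def ensure_tags_py_alt (tags : List String) : List String :=
  let cleaned :=
    ((tags.filter (fun t => !(PySem.Str.strip t == ""))).map (fun t => PySem.Str.strip t))
      ++ ["digital download", "printable", "digital planner", "download"]
  let rest := cleaned.map (fun t => (t, PySem.Str.lower t))
  pvBLoop rest []

-- ===== PRECONDITION & SPEC =====
def Spec_ensure_tags_py (tags : List String) (out : List String) : Prop := out = ensure_tags_py_alt tags
instance (tags : List String) (out : List String) : Decidable (Spec_ensure_tags_py tags out) := by unfold Spec_ensure_tags_py; infer_instance

-- ===== CLAIM =====
def Claim_equal_ensure_tags_py : Prop := ∀ (tags : List String), Dom_ensure_tags_py tags → Spec_ensure_tags_py tags (ensure_tags_py tags)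

-- ===== LEMMAS AND PROOFS =====

-- proof-only normal form: filter-based first-occurrence dedup (case-insensitive)
def pvDedup : List String → List String
  | [] => []
  | h :: t =>
    h :: pvDedup (t.filter (fun x => !(PySem.Str.lower x == PySem.Str.lower h)))
  termination_by xs => xs.length
  decreasing_by
    simp only [List.length_unattach]
    exact Nat.lt_succ_of_le (le_trans (List.length_filter_le _ _) (by simp))

-- the dedup fold only appends to the accumulator
theorem pvFold_acc_prefix (gs : List String) (s : PySem.Set String) (u : List String) :
    ∃ ext, (gs.foldl pvDedupStep (s, u)).2 = u ++ ext := by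
  induction gs generalizing s u with
  | nil => exact ⟨[], by simp⟩
  | cons g gs ih =>
    simp only [List.foldl_cons, pvDedupStep]
    split
    · exact ih s u
    · obtain ⟨ext, h⟩ := ih (PySem.Set.add s (PySem.Str.lower g)) (u ++ [g])
      exact ⟨g :: ext, by simpa using h⟩

-- A's break-guarded pad loop agrees with the plain dedup fold after truncation to 13
theorem pvPadLoop_take (gs : List String) (s : PySem.Set String) (u : List String) :
    (pvPadLoop gs s u).take 13 = (gs.foldl pvDedupStep (s, u)).2.take 13 := by
  induction gs generalizing s u with
  | nil => rfl
  | cons g gs ih =>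
    by_cases h13 : 13 ≤ u.length
    · obtain ⟨ext, h⟩ := pvFold_acc_prefix (g :: gs) s u
      rw [pvPadLoop, if_pos h13, h, List.take_append_of_le_length h13]
    · rw [pvPadLoop, if_neg h13, List.foldl_cons]
      unfold pvDedupStep
      split
      · exact ih s u
      · exact ih _ _

theorem pvContains_add (s : PySem.Set String) (k y : String) :
    PySem.Set.contains (PySem.Set.add s k) y = (PySem.Set.contains s y || y == k) := by
  simp only [PySem.Set.add]
  split
  · rename_i hks
    cases hk : y == k <;> simp_all [PySem.Set.contains]
  · cases hk : y == k <;> simp_all [PySem.Set.contains]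

-- the seen-set fold equals the filter-based dedup of the candidates not already seen
theorem pvFold_eq_dedup (xs : List String) (s : PySem.Set String) (u : List String) :
    (xs.foldl pvDedupStep (s, u)).2 =
      u ++ pvDedup (xs.filter (fun x => !(PySem.Set.contains s (PySem.Str.lower x)))) := by
  induction xs generalizing s u with
  | nil => simp [pvDedup]
  | cons h t ih =>
    rw [List.foldl_cons, List.filter_cons]
    by_cases hc : PySem.Set.contains s (PySem.Str.lower h) = true
    · have hm : PySem.Str.lower h ∈ s := by simpa [PySem.Set.contains] using hc
      rw [show pvDedupStep (s, u) h = (s, u) by simp [pvDedupStep, hm]]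
      rw [show (!PySem.Set.contains s (PySem.Str.lower h)) = false by
        simp [PySem.Set.contains, hm]]
      simpa using ih s u
    · have hm : PySem.Str.lower h ∉ s := by simpa [PySem.Set.contains] using hc
      rw [show pvDedupStep (s, u) h =
          (PySem.Set.add s (PySem.Str.lower h), u ++ [h]) by simp [pvDedupStep, hm]]
      rw [show (!PySem.Set.contains s (PySem.Str.lower h)) = true by
        simp [PySem.Set.contains, hm]]
      rw [if_pos rfl]
      rw [ih (PySem.Set.add s (PySem.Str.lower h)) (u ++ [h])]
      have hfil :
          t.filter (fun x => !(PySem.Set.contains (PySem.Set.add s (PySem.Str.lower h)) (PySem.Str.lower x)))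
            = (t.filter (fun x => !(PySem.Set.contains s (PySem.Str.lower x)))).filter
                (fun x => !(PySem.Str.lower x == PySem.Str.lower h)) := by
        rw [List.filter_filter]
        apply List.filter_congr
        intro x _
        rw [pvContains_add]
        cases hx : PySem.Set.contains s (PySem.Str.lower x) <;> simp [Bool.and_comm]
      rw [hfil, pvDedup, List.append_assoc, List.singleton_append]

-- B's bounded selection loop over key pairs computes the truncated dedup
theorem pvBLoop_eq (xs : List String) : ∀ out : List String, out.length ≤ 13 →
    pvBLoop (xs.map (fun t => (t, PySem.Str.lower t))) out = (out ++ pvDedup xs).take 13 := by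
  induction xs using pvDedup.induct with
  | case1 =>
    intro out hle
    rw [List.map_nil, pvBLoop, pvDedup, List.append_nil, List.take_of_length_le hle]
  | case2 h t ih =>
    intro out hle
    simp only [List.unattach_filter, List.unattach_attach] at ih
    rw [List.map_cons, pvBLoop]
    by_cases h13 : 13 ≤ out.length
    · rw [if_pos h13, List.take_append_of_le_length h13, List.take_of_length_le hle]
    · rw [if_neg h13]
      by_cases hb : out.length + 1 = 13
      · rw [if_pos hb, pvDedup, List.take_append,
          List.take_of_length_le (by omega), show 13 - out.length = 1 by omega]
        rw [List.take_cons (by omega), List.take_zero]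
      · rw [if_neg hb]
        rw [show (t.map (fun t => (t, PySem.Str.lower t))).filter
              (fun p => !(p.2 == PySem.Str.lower h))
            = (t.filter (fun x => !(PySem.Str.lower x == PySem.Str.lower h))).map
                (fun t => (t, PySem.Str.lower t)) from by
          rw [List.filter_map]; rfl]
        rw [ih (out ++ [h]) (by simp; omega)]
        rw [pvDedup]
        simp

theorem ensure_tags_py_eq (tags : List String) :
    ensure_tags_py tags = ensure_tags_py_alt tags := by
  simp only [ensure_tags_py, ensure_tags_py_alt]
  rw [pvBLoop_eq _ [] (by simp)]
  rw [List.nil_append]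
  set cl := ((tags.filter (fun t => !(PySem.Str.strip t == ""))).map
      (fun t => PySem.Str.strip t)) with hcl
  have hfold : ∀ ys : List String,
      (ys.foldl pvDedupStep (PySem.Set.empty, [])).2 = pvDedup ys := by
    intro ys
    rw [pvFold_eq_dedup]
    simp [PySem.Set.empty, PySem.Set.contains]
  set p := cl.foldl pvDedupStep (PySem.Set.empty, []) with hp
  have hsplit : (List.foldl pvDedupStep p ["digital download", "printable",
      "digital planner", "download"]).2 = pvDedup (cl ++
      ["digital download", "printable", "digital planner", "download"]) := by
    rw [show List.foldl pvDedupStep p ["digital download", "printable",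
        "digital planner", "download"] = List.foldl pvDedupStep (PySem.Set.empty, [])
        (cl ++ ["digital download", "printable", "digital planner", "download"]) by
      rw [List.foldl_append, hp]]
    exact hfold _
  by_cases h : p.2.length < 13
  · rw [if_pos h, pvPadLoop_take]
    rw [show List.foldl pvDedupStep (p.1, p.2) ["digital download", "printable",
        "digital planner", "download"] = List.foldl pvDedupStep p ["digital download",
        "printable", "digital planner", "download"] by rfl]
    rw [hsplit]
  · rw [if_neg h]
    obtain ⟨ext, he⟩ := pvFold_acc_prefix
      ["digital download", "printable", "digital planner", "download"] p.1 p.2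
    have h2 : (List.foldl pvDedupStep p ["digital download", "printable",
        "digital planner", "download"]).2 = p.2 ++ ext := he
    rw [← hsplit, h2, List.take_append_of_le_length (by omega)]

-- ===== VERDICT =====
theorem ensure_tags_py_spec : Claim_equal_ensure_tags_py := by
  intro tags _
  exact (ensure_tags_py_eq tags).symm ▸ rfl
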